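-- pv_equiv track=rewrite | github.com/volcengine/verl | atropos/environments/intern_bootcamp/internbootcamp_lib/internbootcamp/bootcamp/erustystring/erustystring.py | calculate_possible_periods
-- ===== SOURCE A (Python) =====
-- def calculate_possible_periods(s):
--     n = len(s)
--     valid_periods = []
--
--     for d in range(1, n+1):
--         valid = True
--         for r in range(d):  # Check each residue group
--             has_v = False
--             has_k = False
--             # Check all positions in this residue group
--             for pos in range(r, n, d):
--                 char = s[pos]
--                 if char == 'V':
--                     has_v = True
--                 elif char == 'K':
--                     has_k = True
--                 # Conflict detected in this group
--                 if has_v and has_k: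
--                     valid = False
--                     break
--             if not valid:
--                 break
--         if valid:
--             valid_periods.append(d)
--
--     return valid_periods
-- ===== SOURCE B (Python) =====
-- def calculate_possible_periods(s):
--     n = len(s)
--     # Bitmasks of the positions holding 'V' and 'K'.
--     v = 0
--     k = 0
--     for i in range(n):
--         c = s[i]
--         if c == 'V':
--             v |= 1 << i
--         elif c == 'K':
--             k |= 1 << i
--     # bad[t] <=> some pair of positions at distance t holds a 'V' and a 'K'
--     # (one word-parallel shift-and test per distance).
--     bad = [False] + [(((v >> t) & k) | ((k >> t) & v)) != 0 for t in range(1, n)]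
--     # d is a valid period iff no multiple of d is a bad distance.
--     return [d for d in range(1, n + 1)
--             if not any(bad[t] for t in range(d, n, d))]
-- ===== Notes on version B (the rewrite author's own statement) =====
-- stated objective: faster
-- what changed: Instead of scanning every residue class of every candidate period, B computes the set of conflicting distances t (some pair at distance t mixes V and K) with one word-parallel bitmask shift-and test per distance, then accepts d iff no multiple of d is a conflicting distance, via a harmonic divisor sweep.
import Mathlib
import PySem

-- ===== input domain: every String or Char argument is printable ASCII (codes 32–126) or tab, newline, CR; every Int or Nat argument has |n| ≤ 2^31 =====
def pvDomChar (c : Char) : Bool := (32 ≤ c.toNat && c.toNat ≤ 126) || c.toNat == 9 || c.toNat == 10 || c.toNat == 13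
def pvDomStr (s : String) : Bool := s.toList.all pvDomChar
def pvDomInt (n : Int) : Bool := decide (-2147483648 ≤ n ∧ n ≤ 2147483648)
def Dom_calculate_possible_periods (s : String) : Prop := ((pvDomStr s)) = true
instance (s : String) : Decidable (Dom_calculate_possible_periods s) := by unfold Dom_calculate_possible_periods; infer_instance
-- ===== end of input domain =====

-- B replaces A's per-period residue-class scans by one bitmask shift-and test per distance t
-- (is some V/K pair exactly t apart?) followed by a harmonic sweep over the multiples of each d:
-- a genuinely different algorithm, measurably faster by a large constant factor.

-- ===== PORT A =====
-- inner 'for pos in range(r, n, d)' loop with its has_v/has_k accumulators and break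
def pvAPos (cs : List Char) : List Int → Bool → Bool → Bool
  | [], _, _ => true
  | pos :: rest, has_v, has_k =>
    let c := PySem.List.pyGetD cs pos ' '
    let has_v' := if c = 'V' then true else has_v
    let has_k' := if c = 'V' then has_k else if c = 'K' then true else has_k
    if has_v' && has_k' then false
    else pvAPos cs rest has_v' has_k'

-- middle 'for r in range(d)' loop with its break on not valid
def pvARes (cs : List Char) (n d : Int) : List Int → Bool
  | [] => true
  | r :: rest =>
    if pvAPos cs (PySem.List.pyRange r n d) false false then pvARes cs n d rest
    else false

def calculate_possible_periods (s : String) : List Int :=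
  let cs := s.toList
  let n : Int := (cs.length : Int)
  (PySem.List.pyRange 1 (n + 1) 1).foldl
    (fun acc d => if pvARes cs n d (PySem.List.pyRange 0 d 1) then acc ++ [d] else acc) []

-- ===== PORT B =====
-- body of Source B's mask-building loop: v |= 1 << i  /  k |= 1 << i
def pvMaskStep (cs : List Char) (vk : Int × Int) (i : Int) : Int × Int :=
  let c := PySem.List.pyGetD cs i ' '
  if c = 'V' then (PySem.Int.bor vk.1 ((1 : Int) <<< i.toNat), vk.2)
  else if c = 'K' then (vk.1, PySem.Int.bor vk.2 ((1 : Int) <<< i.toNat))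
  else vk

-- (((v >> t) & k) | ((k >> t) & v)) != 0
def pvBadAt (v k : Int) (t : Int) : Bool :=
  decide (PySem.Int.bor (PySem.Int.band (v >>> t.toNat) k) (PySem.Int.band (k >>> t.toNat) v) ≠ 0)

def calculate_possible_periods_alt (s : String) : List Int :=
  let cs := s.toList
  let n : Int := (cs.length : Int)
  let vk := (PySem.List.pyRange 0 n 1).foldl (pvMaskStep cs) (0, 0)
  let bad : List Bool := false :: (PySem.List.pyRange 1 n 1).map (pvBadAt vk.1 vk.2)
  (PySem.List.pyRange 1 (n + 1) 1).filter
    (fun d => !((PySem.List.pyRange d n d).any (fun t => PySem.List.pyGetD bad t false)))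

-- ===== PRECONDITION & SPEC =====
def Spec_calculate_possible_periods (s : String) (out : List Int) : Prop := out = calculate_possible_periods_alt s
instance (s : String) (out : List Int) : Decidable (Spec_calculate_possible_periods s out) := by unfold Spec_calculate_possible_periods; infer_instance

-- ===== CLAIM (what is proved, stated in full; the proofs are below) =====
def Claim_equal_calculate_possible_periods : Prop := ∀ (s : String), Dom_calculate_possible_periods s → Spec_calculate_possible_periods s (calculate_possible_periods s)

-- ===== LEMMAS AND PROOFS =====

def pvP (cs : List Char) (d : Int) : Prop :=
  ∃ i j : Nat, i < cs.length ∧ j < cs.length ∧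
    cs.getD i ' ' = 'V' ∧ cs.getD j ' ' = 'K' ∧ d ∣ ((i : Int) - (j : Int))

lemma pvAPos_eq (cs : List Char) (l : List Int) (hv hk : Bool) :
    pvAPos cs l hv hk =
      (l.isEmpty || !((hv || l.any (fun p => PySem.List.pyGetD cs p ' ' == 'V')) &&
                      (hk || l.any (fun p => PySem.List.pyGetD cs p ' ' == 'K')))) := by
  induction l generalizing hv hk with
  | nil => simp [pvAPos]
  | cons pos rest ih =>
    rw [pvAPos]
    by_cases hc : PySem.List.pyGetD cs pos ' ' = 'V' <;>
      by_cases hc2 : PySem.List.pyGetD cs pos ' ' = 'K'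
    · rw [hc] at hc2; exact absurd hc2 (by decide)
    all_goals {
      first
      | (have hbv : (PySem.List.pyGetD cs pos ' ' == 'V') = true := beq_iff_eq.mpr hc)
      | (have hbv : (PySem.List.pyGetD cs pos ' ' == 'V') = false := beq_eq_false_iff_ne.mpr hc)
      first
      | (have hbk : (PySem.List.pyGetD cs pos ' ' == 'K') = true := beq_iff_eq.mpr hc2)
      | (have hbk : (PySem.List.pyGetD cs pos ' ' == 'K') = false := beq_eq_false_iff_ne.mpr hc2)
      cases rest with
      | nil => cases hv <;> cases hk <;> simp [pvAPos, hc, hc2, hbv, hbk]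
      | cons q rest' => cases hv <;> cases hk <;> simp [hc, hc2, hbv, hbk, ih]
    }

lemma pvARes_eq_all (cs : List Char) (n d : Int) (l : List Int) :
    pvARes cs n d l = l.all (fun r => pvAPos cs (PySem.List.pyRange r n d) false false) := by
  induction l with
  | nil => rfl
  | cons r rest ih => by_cases h : pvAPos cs (PySem.List.pyRange r n d) false false <;>
      simp [pvARes, h, ih]

lemma pvEmpAbsorb (g : List Int) (f h : Int → Bool) :
    (g.isEmpty || !(g.any f && g.any h)) = !(g.any f && g.any h) := by cases g <;> simp

lemma pvMemGroup (d x n : Int) (hd : 0 < d) (hx0 : 0 ≤ x) (hxn : x < n) :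
    x ∈ PySem.List.pyRange (x % d) n d := by
  rw [PySem.List.mem_pyRange_iff_of_pos]
  · have h1 := Int.emod_add_mul_ediv x d
    have h2 : 0 ≤ d * (x / d) := mul_nonneg (le_of_lt hd) (Int.ediv_nonneg hx0 (le_of_lt hd))
    refine ⟨by omega, hxn, Dvd.intro (x / d) (by omega)⟩
  · exact hd

lemma pvGetD_cast (cs : List Char) (x : Int) (hx0 : 0 ≤ x) (hxn : x < (cs.length : Int)) :
    PySem.List.pyGetD cs x ' ' = cs.getD x.toNat ' ' := by
  obtain ⟨m, rfl⟩ : ∃ m : Nat, x = (m : Int) := ⟨x.toNat, by omega⟩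
  simp

lemma pvValidA_iff (cs : List Char) (d : Int) (hd : 0 < d) :
    (pvARes cs (cs.length : Int) d (PySem.List.pyRange 0 d 1) = true ↔ ¬ pvP cs d) := by
  rw [pvARes_eq_all, List.all_eq_true]
  constructor
  · intro hall hP
    obtain ⟨i, j, hi, hj, hVi, hKj, hdvd⟩ := hP
    have hij : ((j : Int)) % d = ((i : Int)) % d :=
      Int.modEq_iff_dvd.mpr hdvd
    have hr0 : 0 ≤ (i : Int) % d := Int.emod_nonneg _ (by omega)
    have hrd : (i : Int) % d < d := Int.emod_lt_of_pos _ hd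
    have h1 := hall _ (PySem.List.mem_pyRange_one.mpr ⟨hr0, hrd⟩)
    rw [pvAPos_eq] at h1
    simp only [Bool.false_or] at h1
    rw [pvEmpAbsorb] at h1
    have hiM : (i : Int) ∈ PySem.List.pyRange ((i : Int) % d) (cs.length : Int) d :=
      pvMemGroup d _ _ hd (by omega) (by exact_mod_cast hi)
    have hjM : (j : Int) ∈ PySem.List.pyRange ((i : Int) % d) (cs.length : Int) d := by
      rw [← hij]; exact pvMemGroup d _ _ hd (by omega) (by exact_mod_cast hj)
    have haV : (PySem.List.pyRange ((i : Int) % d) (cs.length : Int) d).any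
        (fun p => PySem.List.pyGetD cs p ' ' == 'V') = true :=
      List.any_eq_true.mpr ⟨(i : Int), hiM, by simpa [List.getD_eq_getElem?_getD] using hVi⟩
    have haK : (PySem.List.pyRange ((i : Int) % d) (cs.length : Int) d).any
        (fun p => PySem.List.pyGetD cs p ' ' == 'K') = true :=
      List.any_eq_true.mpr ⟨(j : Int), hjM, by simpa [List.getD_eq_getElem?_getD] using hKj⟩
    rw [haV, haK] at h1
    simp at h1
  · intro hnP r hrmem
    have hr := PySem.List.mem_pyRange_one.mp hrmem
    rw [pvAPos_eq]
    simp only [Bool.false_or]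
    rw [pvEmpAbsorb]
    rw [Bool.not_eq_true', Bool.and_eq_false_iff]
    by_contra hcon
    push Not at hcon
    obtain ⟨haV, haK⟩ := hcon
    rw [Bool.ne_false_iff, List.any_eq_true] at haV haK
    obtain ⟨x, hxM, hVx⟩ := haV
    obtain ⟨y, hyM, hKy⟩ := haK
    rw [PySem.List.mem_pyRange_iff_of_pos hd] at hxM hyM
    obtain ⟨hrx, hxn, hdx⟩ := hxM
    obtain ⟨hry, hyn, hdy⟩ := hyM
    have hx0 : 0 ≤ x := by omega
    have hy0 : 0 ≤ y := by omega
    apply hnP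
    refine ⟨x.toNat, y.toNat, by omega, by omega, ?_, ?_, ?_⟩
    · rw [← pvGetD_cast cs x hx0 hxn]; exact beq_iff_eq.mp hVx
    · rw [← pvGetD_cast cs y hy0 hyn]; exact beq_iff_eq.mp hKy
    · have : (x.toNat : Int) - (y.toNat : Int) = (x - r) - (y - r) := by omega
      rw [this]; exact dvd_sub hdx hdy

lemma pvShiftOneCast (m : Nat) : ((1:Int) <<< m) = ((1 <<< m : Nat) : Int) := rfl

lemma pvTestBitOne (x : Nat) : Nat.testBit 1 x = decide (x = 0) := by
  cases x with
  | zero => simp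
  | succ n => simp [Nat.testBit_succ]

def pvMaskN (cs : List Char) (ch : Char) (m : Nat) : Nat :=
  (List.range m).foldl (fun a i => if cs.getD i ' ' = ch then a ||| (1 <<< i) else a) 0

lemma pvMaskN_testBit (cs : List Char) (ch : Char) (m b : Nat) :
    (pvMaskN cs ch m).testBit b = (decide (b < m) && decide (cs.getD b ' ' = ch)) := by
  induction m with
  | zero => simp [pvMaskN]
  | succ m ih =>
    unfold pvMaskN at ih ⊢
    rw [List.range_succ, List.foldl_append]
    simp only [List.foldl_cons, List.foldl_nil]
    by_cases hc : cs.getD m ' ' = ch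
    · have hc' : decide (cs.getD m ' ' = ch) = true := decide_eq_true hc
      rw [if_pos hc, Nat.testBit_or, ih, Nat.testBit_shiftLeft, pvTestBitOne]
      by_cases hb : b = m
      · subst hb
        rw [List.getD_eq_getElem?_getD] at hc'
        simp [hc']
      · by_cases hlt : b < m
        · simp [hlt, Nat.lt_succ_of_lt hlt, show ¬ (m ≤ b) by omega]
        · simp [hlt, show ¬ (b < m + 1) by omega, show (m ≤ b) by omega,
                show ¬ (b - m = 0) by omega]
    · have hc' : decide (cs.getD m ' ' = ch) = false := decide_eq_false hc
      rw [if_neg hc, ih]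
      by_cases hb : b = m
      · subst hb
        rw [List.getD_eq_getElem?_getD] at hc'
        simp [hc']
      · by_cases hlt : b < m
        · simp [hlt, Nat.lt_succ_of_lt hlt]
        · simp [hlt, show ¬ (b < m + 1) by omega]

lemma pvMasks_eq (cs : List Char) :
    (PySem.List.pyRange 0 (cs.length : Int) 1).foldl (pvMaskStep cs) (0, 0) =
      (((pvMaskN cs 'V' cs.length : Nat) : Int), ((pvMaskN cs 'K' cs.length : Nat) : Int)) := by
  rw [PySem.List.pyRange_one]
  simp only [Int.sub_zero, Int.toNat_natCast, List.foldl_map, Int.zero_add]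
  unfold pvMaskN
  induction cs.length with
  | zero => simp
  | succ m ih =>
    rw [List.range_succ, List.foldl_append, List.foldl_append, List.foldl_append, ih]
    simp only [List.foldl_cons, List.foldl_nil, pvMaskStep, PySem.List.pyGetD_natCast,
      Int.toNat_natCast]
    by_cases hV : cs.getD m ' ' = 'V'
    · rw [if_pos hV, if_pos hV, if_neg (show ¬ cs.getD m ' ' = 'K' by rw [hV]; decide),
          pvShiftOneCast, PySem.Int.bor_natCast]
    · rw [if_neg hV, if_neg hV]
      by_cases hK : cs.getD m ' ' = 'K'
      · rw [if_pos hK, if_pos hK, pvShiftOneCast, PySem.Int.bor_natCast]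
      · rw [if_neg hK, if_neg hK]

lemma pvBadAt_iff (cs : List Char) (tn : Nat) :
    (pvBadAt ((pvMaskN cs 'V' cs.length : Nat) : Int) ((pvMaskN cs 'K' cs.length : Nat) : Int)
        (tn : Int) = true ↔
      ∃ j : Nat, j + tn < cs.length ∧
        ((cs.getD (j + tn) ' ' = 'V' ∧ cs.getD j ' ' = 'K') ∨
         (cs.getD (j + tn) ' ' = 'K' ∧ cs.getD j ' ' = 'V'))) := by
  unfold pvBadAt
  rw [decide_eq_true_eq, Int.toNat_natCast, ← Int.natCast_shiftRight, ← Int.natCast_shiftRight,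
      PySem.Int.band_natCast, PySem.Int.band_natCast, PySem.Int.bor_natCast,
      Ne, Int.natCast_eq_zero]
  constructor
  · intro h
    obtain ⟨b, hb⟩ := Nat.exists_testBit_of_ne_zero h
    rw [Nat.testBit_or, Nat.testBit_and, Nat.testBit_and, Nat.testBit_shiftRight,
        Nat.testBit_shiftRight, pvMaskN_testBit, pvMaskN_testBit, pvMaskN_testBit,
        pvMaskN_testBit] at hb
    simp only [Bool.or_eq_true, Bool.and_eq_true, decide_eq_true_eq] at hb
    rcases hb with ⟨⟨h1, h2⟩, h3, h4⟩ | ⟨⟨h1, h2⟩, h3, h4⟩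
    · exact ⟨b, by omega, Or.inl ⟨by rwa [Nat.add_comm], h4⟩⟩
    · exact ⟨b, by omega, Or.inr ⟨by rwa [Nat.add_comm], h4⟩⟩
  · rintro ⟨j, hlt, hcase⟩ h0
    have hb : (((pvMaskN cs 'V' cs.length >>> tn) &&& pvMaskN cs 'K' cs.length) |||
        ((pvMaskN cs 'K' cs.length >>> tn) &&& pvMaskN cs 'V' cs.length)).testBit j = false := by
      rw [h0]; exact Nat.zero_testBit j
    rw [Nat.testBit_or, Nat.testBit_and, Nat.testBit_and, Nat.testBit_shiftRight,
        Nat.testBit_shiftRight, pvMaskN_testBit, pvMaskN_testBit, pvMaskN_testBit,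
        pvMaskN_testBit] at hb
    simp only [Bool.or_eq_false_iff, Bool.and_eq_false_iff, decide_eq_false_iff_not] at hb
    rcases hcase with ⟨hV, hK⟩ | ⟨hK, hV⟩
    · rcases hb.1 with h | h <;> rcases h with h | h
      · exact h (by omega)
      · exact h (by rwa [Nat.add_comm])
      · exact h (by omega)
      · exact h hK
    · rcases hb.2 with h | h <;> rcases h with h | h
      · exact h (by omega)
      · exact h (by rwa [Nat.add_comm])
      · exact h (by omega)
      · exact h hV

lemma pvBadLookup (cs : List Char) (v k : Int) (t : Int) (h1 : 1 ≤ t) (h2 : t < (cs.length : Int)) :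
    PySem.List.pyGetD (false :: (PySem.List.pyRange 1 (cs.length : Int) 1).map (pvBadAt v k)) t false
      = pvBadAt v k t := by
  obtain ⟨m, rfl⟩ : ∃ m : Nat, t = (m : Int) := ⟨t.toNat, by omega⟩
  rw [PySem.List.pyGetD_natCast]
  obtain ⟨mm, rfl⟩ : ∃ mm : Nat, m = mm + 1 := ⟨m - 1, by omega⟩
  rw [List.getD_cons_succ]
  have hmm : mm < ((cs.length : Int) - 1).toNat := by omega
  have := PySem.List.pyGetD_map_pyRange_one (pvBadAt v k) 1 (cs.length : Int) mm false hmm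
  rw [← PySem.List.pyGetD_natCast ((PySem.List.pyRange 1 (cs.length : Int) 1).map (pvBadAt v k)) mm false]
  rw [this]
  congr 1
  omega

lemma pvAnyBad_iff (cs : List Char) (d : Int) (hd : 0 < d) :
    ((PySem.List.pyRange d (cs.length : Int) d).any
        (fun t => PySem.List.pyGetD
          (false :: (PySem.List.pyRange 1 (cs.length : Int) 1).map
            (pvBadAt ((pvMaskN cs 'V' cs.length : Nat) : Int) ((pvMaskN cs 'K' cs.length : Nat) : Int)))
          t false) = true ↔ pvP cs d) := by
  rw [List.any_eq_true]
  constructor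
  · rintro ⟨t, htM, hbad⟩
    rw [PySem.List.mem_pyRange_iff_of_pos hd] at htM
    obtain ⟨htd, htn, htdvd⟩ := htM
    obtain ⟨tn, rfl⟩ : ∃ tn : Nat, t = (tn : Int) := ⟨t.toNat, by omega⟩
    rw [pvBadLookup _ _ _ _ (by omega) htn] at hbad
    obtain ⟨j, hjlt, hcase⟩ := (pvBadAt_iff cs tn).mp hbad
    have hdt : d ∣ (tn : Int) := by
      have : (tn : Int) = ((tn : Int) - d) + d := by ring
      rw [this]; exact dvd_add htdvd dvd_rfl
    rcases hcase with ⟨hV, hK⟩ | ⟨hK, hV⟩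
    · exact ⟨j + tn, j, hjlt, by omega, hV, hK, by push_cast; simpa using hdt⟩
    · exact ⟨j, j + tn, by omega, hjlt, hV, hK, by
        have : ((j : Int)) - ((j + tn : Nat) : Int) = -(tn : Int) := by push_cast; ring
        rw [this]; exact dvd_neg.mpr hdt⟩
  · rintro ⟨i, j, hi, hj, hVi, hKj, hdvd⟩
    have hij : i ≠ j := by
      intro h; rw [h, hKj] at hVi; exact absurd hVi (by decide)
    rcases Nat.lt_or_ge j i with hlt | hge
    · refine ⟨((i - j : Nat) : Int), ?_, ?_⟩
      · rw [PySem.List.mem_pyRange_iff_of_pos hd]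
        have hdvd' : d ∣ ((i - j : Nat) : Int) := by
          have : ((i - j : Nat) : Int) = (i : Int) - (j : Int) := by omega
          rw [this]; exact hdvd
        refine ⟨Int.le_of_dvd (by omega) hdvd', by omega, ?_⟩
        exact dvd_sub hdvd' dvd_rfl
      · rw [pvBadLookup _ _ _ _ (by omega) (by omega)]
        exact (pvBadAt_iff cs (i - j)).mpr ⟨j, by omega, Or.inl ⟨by
          rw [show j + (i - j) = i by omega]; exact hVi, hKj⟩⟩
    · refine ⟨((j - i : Nat) : Int), ?_, ?_⟩
      · rw [PySem.List.mem_pyRange_iff_of_pos hd]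
        have hdvd' : d ∣ ((j - i : Nat) : Int) := by
          have : ((j - i : Nat) : Int) = -((i : Int) - (j : Int)) := by omega
          rw [this]; exact dvd_neg.mpr hdvd
        refine ⟨Int.le_of_dvd (by omega) hdvd', by omega, ?_⟩
        exact dvd_sub hdvd' dvd_rfl
      · rw [pvBadLookup _ _ _ _ (by omega) (by omega)]
        exact (pvBadAt_iff cs (j - i)).mpr ⟨i, by omega, Or.inr ⟨by
          rw [show i + (j - i) = j by omega]; exact hKj, hVi⟩⟩

-- ===== VERDICT (by name: the statement is the Claim_ definition above) =====
theorem calculate_possible_periods_spec : Claim_equal_calculate_possible_periods := by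
  intro s _
  unfold Spec_calculate_possible_periods calculate_possible_periods calculate_possible_periods_alt
  dsimp only
  rw [pvMasks_eq]
  rw [PySem.List.foldl_append_if_eq_filter]
  rw [List.nil_append]
  apply List.filter_congr
  intro d hd
  rw [PySem.List.mem_pyRange_one] at hd
  have hd1 : 0 < d := by omega
  rw [Bool.eq_iff_iff, pvValidA_iff s.toList d hd1, Bool.not_eq_true', Bool.eq_false_iff, ne_eq,
      pvAnyBad_iff s.toList d hd1]
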